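-- pv_equiv track=rewrite | github.com/pypi-data/pypi-mirror-162 | packages/Unit-Test-Helper/Unit_Test_Helper-0.0.2.tar.gz/Unit_Test_Helper-0.0.2/src/Unit_Test_Helper/case_generator.py | convert_1d_idx_to_2d
-- ===== SOURCE A (Python) =====
-- from typing import Any, List, Tuple
--
-- def convert_1d_idx_to_2d(d1_val: str, D2_list: List[list]) -> Tuple[int, int]:
--     """takes 1D mapped value and finds the 2D equivalent and returns idx of that element in passed D2_list."""
--     int_d1 = int(d1_val)
--     idx1 = 0
--     sum_idx = 0
--     dims = (len(inner_list) for inner_list in D2_list)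
--
--     for dim_size in dims:
--         if sum_idx + dim_size > int_d1:
--             break
--
--         sum_idx += dim_size
--         idx1+=1
--
--     idx2 = int_d1 - sum_idx
--
--     return idx1, idx2
-- ===== SOURCE B (Python) =====
-- def convert_1d_idx_to_2d(d1_val, D2_list):
--     """takes 1D mapped value and finds the 2D equivalent and returns idx of that element in passed D2_list."""
--     target = int(d1_val)
--     prefix = [0]
--     for inner in D2_list:
--         prefix.append(prefix[-1] + len(inner))
--     # bisect_right over the monotone prefix table
--     lo, hi = 0, len(prefix)
--     while lo < hi:
--         mid = (lo + hi) // 2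
--         if prefix[mid] <= target:
--             lo = mid + 1
--         else:
--             hi = mid
--     idx1 = lo - 1 if lo > 0 else 0
--     return idx1, target - prefix[idx1]
-- ===== Notes on version B (the rewrite author's own statement) =====
-- stated objective: alternative
-- what changed: Replaces A's greedy linear walk carrying (idx1, sum_idx) state with a prefix-sum table built once plus a bisect_right-style binary search for the row index.
import Mathlib
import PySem

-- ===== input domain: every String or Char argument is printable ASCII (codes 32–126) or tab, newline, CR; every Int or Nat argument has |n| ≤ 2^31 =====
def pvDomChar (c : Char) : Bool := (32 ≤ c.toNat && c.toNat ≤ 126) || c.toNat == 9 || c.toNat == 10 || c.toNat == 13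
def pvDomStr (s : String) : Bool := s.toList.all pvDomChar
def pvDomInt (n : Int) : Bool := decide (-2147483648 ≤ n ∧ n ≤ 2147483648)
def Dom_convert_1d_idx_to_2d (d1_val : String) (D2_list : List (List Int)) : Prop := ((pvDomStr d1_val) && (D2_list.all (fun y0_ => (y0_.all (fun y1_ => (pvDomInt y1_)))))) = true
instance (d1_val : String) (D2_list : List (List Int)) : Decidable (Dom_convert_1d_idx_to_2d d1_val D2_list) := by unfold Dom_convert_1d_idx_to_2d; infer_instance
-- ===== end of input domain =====

-- B replaces A's linear greedy walk by a prefix-sum table plus a bisect_right-style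
-- binary search (objective: alternative decomposition; same overall cost class).

-- ===== PORT A =====
-- A's for-loop over the generator of row lengths, with break; state (idx1, sum_idx)
def pvLoopA (t : Int) : List (List Int) → Int → Int → Int × Int
  | [], idx1, sum_idx => (idx1, sum_idx)
  | inner :: rest, idx1, sum_idx =>
    if sum_idx + (inner.length : Int) > t then (idx1, sum_idx)
    else pvLoopA t rest (idx1 + 1) (sum_idx + (inner.length : Int))

def convert_1d_idx_to_2d (d1_val : String) (D2_list : List (List Int)) : Int × Int :=
  match PySem.Int.ofStr? d1_val with
  | none => (0, 0)  -- int(d1_val) raises ValueError; excluded by Pre_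
  | some int_d1 =>
    let r := pvLoopA int_d1 D2_list 0 0
    (r.1, int_d1 - r.2)

-- ===== PORT B =====
-- prefix = [0]; for inner: prefix.append(prefix[-1] + len(inner)); cur tracks prefix[-1]
def pvBuildPref (cur : Int) : List (List Int) → List Int
  | [] => []
  | inner :: rest => (cur + (inner.length : Int)) :: pvBuildPref (cur + (inner.length : Int)) rest

-- B's while-loop binary search; lo, hi stay in [0, len(prefix)] in Python, ported as Nat
-- (so (lo+hi)//2 is Nat division = Python //); mid is inlined; prefix[mid] is always in
-- range in Python, ported as getD (exact here); fuel only makes the loop structural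
-- (fuel = hi - lo at the call site always suffices, so it never changes the result)
def pvBisect (P : List Int) (t : Int) : Nat → Nat → Nat → Nat
  | 0, lo, _ => lo
  | fuel + 1, lo, hi =>
    if lo < hi then
      if P.getD ((lo + hi) / 2) 0 ≤ t then pvBisect P t fuel ((lo + hi) / 2 + 1) hi
      else pvBisect P t fuel lo ((lo + hi) / 2)
    else lo

def convert_1d_idx_to_2d_alt (d1_val : String) (D2_list : List (List Int)) : Int × Int :=
  match PySem.Int.ofStr? d1_val with
  | none => (0, 0)  -- int(d1_val) raises ValueError; excluded by Pre_
  | some target =>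
    let pref := 0 :: pvBuildPref 0 D2_list
    let lo := pvBisect pref target pref.length 0 pref.length
    let idx1 := if 0 < lo then lo - 1 else 0
    ((idx1 : Int), target - pref.getD idx1 0)

-- ===== PRECONDITION & SPEC =====
-- Pre_ excludes exactly the strings on which int(d1_val) raises ValueError (both A and B raise there).
def Pre_convert_1d_idx_to_2d (d1_val : String) (D2_list : List (List Int)) : Prop :=
  (PySem.Int.ofStr? d1_val).isSome = true
instance (d1_val : String) (D2_list : List (List Int)) : Decidable (Pre_convert_1d_idx_to_2d d1_val D2_list) := by unfold Pre_convert_1d_idx_to_2d; infer_instance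

def pvWitness_convert_1d_idx_to_2d : String × List (List Int) := ("3", [[1, 2], [], [4]])

def Spec_convert_1d_idx_to_2d (d1_val : String) (D2_list : List (List Int)) (out : Int × Int) : Prop := out = convert_1d_idx_to_2d_alt d1_val D2_list
instance (d1_val : String) (D2_list : List (List Int)) (out : Int × Int) : Decidable (Spec_convert_1d_idx_to_2d d1_val D2_list out) := by unfold Spec_convert_1d_idx_to_2d; infer_instance

-- ===== CLAIM (what is proved, stated in full; the proofs are below) =====
def Claim_equal_convert_1d_idx_to_2d : Prop := ∀ (d1_val : String) (D2_list : List (List Int)), Dom_convert_1d_idx_to_2d d1_val D2_list → Pre_convert_1d_idx_to_2d d1_val D2_list → Spec_convert_1d_idx_to_2d d1_val D2_list (convert_1d_idx_to_2d d1_val D2_list)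

-- ===== LEMMAS AND PROOFS =====

-- sum of the lengths of the first k rows
def pvPref : List (List Int) → Nat → Int
  | _, 0 => 0
  | [], _ + 1 => 0
  | inner :: rest, k + 1 => (inner.length : Int) + pvPref rest k

-- the number of rows A's greedy walk consumes
def pvWalk (t : Int) : List (List Int) → Nat
  | [] => 0
  | inner :: rest => if (inner.length : Int) > t then 0 else pvWalk (t - inner.length) rest + 1

lemma pvPref_zero (L : List (List Int)) : pvPref L 0 = 0 := by
  cases L <;> rfl

lemma pvPref_nonneg (L : List (List Int)) (k : Nat) : 0 ≤ pvPref L k := by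
  induction L generalizing k with
  | nil => cases k <;> simp [pvPref]
  | cons l rest ih =>
    cases k with
    | zero => simp [pvPref]
    | succ k => simpa [pvPref] using add_nonneg (by positivity) (ih k)

lemma pvPref_mono (L : List (List Int)) {i j : Nat} (h : i ≤ j) :
    pvPref L i ≤ pvPref L j := by
  induction L generalizing i j with
  | nil => cases i <;> cases j <;> simp [pvPref]
  | cons l rest ih =>
    cases i with
    | zero => simpa [pvPref] using pvPref_nonneg (l :: rest) j
    | succ i =>
      cases j with
      | zero => omega
      | succ j => simpa [pvPref] using ih (by omega)

lemma pvBuildPref_length (c : Int) (L : List (List Int)) :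
    (pvBuildPref c L).length = L.length := by
  induction L generalizing c with
  | nil => rfl
  | cons l rest ih => simp [pvBuildPref, ih]

lemma pvBuildPref_getD (L : List (List Int)) (c : Int) (k : Nat) (hk : k ≤ L.length) :
    (c :: pvBuildPref c L).getD k 0 = c + pvPref L k := by
  induction L generalizing c k with
  | nil =>
    have hk0 : k = 0 := by simpa using hk
    subst hk0
    simp [pvBuildPref, pvPref]
  | cons l rest ih =>
    cases k with
    | zero => simp [pvPref]
    | succ k =>
      have := ih (c + (l.length : Int)) k (by simpa using hk)
      simpa [pvBuildPref, pvPref, add_assoc] using this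

lemma pvLoopA_eq (t : Int) (L : List (List Int)) (i c : Int) :
    pvLoopA t L i c = (i + (pvWalk (t - c) L : Int), c + pvPref L (pvWalk (t - c) L)) := by
  induction L generalizing i c with
  | nil => simp [pvLoopA, pvWalk, pvPref]
  | cons l rest ih =>
    by_cases h : c + (l.length : Int) > t
    · have hw : (l.length : Int) > t - c := by omega
      simp [pvLoopA, pvWalk, h, hw, pvPref]
    · have hw : ¬ (l.length : Int) > t - c := by omega
      have := ih (i + 1) (c + (l.length : Int))
      rw [pvLoopA, if_neg h, this]
      have harg : t - (c + (l.length : Int)) = t - c - (l.length : Int) := by ring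
      rw [harg]
      simp [pvWalk, hw, pvPref]
      constructor
      · ring
      · ring

lemma pvWalk_le (t : Int) (L : List (List Int)) : pvWalk t L ≤ L.length := by
  induction L generalizing t with
  | nil => simp [pvWalk]
  | cons l rest ih =>
    simp only [pvWalk]
    split
    · simp
    · simpa using ih (t - l.length)

lemma pvWalk_neg (t : Int) (L : List (List Int)) (h : t < 0) : pvWalk t L = 0 := by
  cases L with
  | nil => rfl
  | cons l rest =>
    have hl : (l.length : Int) > t := by
      have : (0 : Int) ≤ (l.length : Int) := by positivity
      omega
    simp [pvWalk, hl]

lemma pvWalk_pref_le (t : Int) (L : List (List Int)) :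
    pvPref L (pvWalk t L) ≤ t ∨ pvWalk t L = 0 := by
  induction L generalizing t with
  | nil => right; rfl
  | cons l rest ih =>
    by_cases h : (l.length : Int) > t
    · right; simp [pvWalk, h]
    · left
      rcases ih (t - l.length) with h2 | h2
      · simp only [pvWalk, if_neg h, pvPref]
        omega
      · simp only [pvWalk, if_neg h, h2, pvPref]
        omega

lemma pvWalk_pref_gt (t : Int) (L : List (List Int))
    (h : pvWalk t L < L.length) : t < pvPref L (pvWalk t L + 1) := by
  induction L generalizing t with
  | nil => simp [pvWalk] at h
  | cons l rest ih =>
    by_cases hl : (l.length : Int) > t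
    · simp only [pvWalk, if_pos hl, pvPref]
      have := pvPref_nonneg rest 0
      omega
    · have hh : pvWalk (t - l.length) rest < rest.length := by
        simp [pvWalk, hl] at h; omega
      have := ih (t - l.length) hh
      simp [pvWalk, hl, pvPref]
      omega

lemma pvBisect_spec (P : List Int) (t : Int)
    (hm : ∀ i j : Nat, i ≤ j → j < P.length → P.getD i 0 ≤ P.getD j 0) :
    ∀ n lo hi : Nat, hi - lo ≤ n → lo ≤ hi → hi ≤ P.length →
    (∀ i, i < lo → P.getD i 0 ≤ t) →
    (∀ i, hi ≤ i → i < P.length → t < P.getD i 0) →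
    lo ≤ pvBisect P t n lo hi ∧ pvBisect P t n lo hi ≤ hi ∧
      (∀ i, i < pvBisect P t n lo hi → P.getD i 0 ≤ t) ∧
      (∀ i, pvBisect P t n lo hi ≤ i → i < P.length → t < P.getD i 0) := by
  intro n
  induction n with
  | zero =>
    intro lo hi hn hle hhi hlo hup
    have hlh : lo = hi := by omega
    rw [pvBisect]
    exact ⟨le_refl _, by omega, hlo, fun i h1 h2 => hup i (by omega) h2⟩
  | succ n ih =>
    intro lo hi hn hle hhi hlo hup
    by_cases hlt : lo < hi
    · rw [pvBisect, if_pos hlt]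
      have hmlo : lo ≤ (lo + hi) / 2 := by omega
      have hmhi : (lo + hi) / 2 < hi := by omega
      by_cases hp : P.getD ((lo + hi) / 2) 0 ≤ t
      · rw [if_pos hp]
        obtain ⟨h1, h2, h3, h4⟩ := ih ((lo + hi) / 2 + 1) hi (by omega) (by omega) hhi
          (fun i hi2 => le_trans (hm i ((lo + hi) / 2) (by omega) (by omega)) hp) hup
        exact ⟨by omega, h2, h3, h4⟩
      · rw [if_neg hp]
        obtain ⟨h1, h2, h3, h4⟩ := ih lo ((lo + hi) / 2) (by omega) (by omega) (by omega) hlo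
          (fun i hi2 h2 => lt_of_lt_of_le (by omega) (hm ((lo + hi) / 2) i hi2 h2))
        exact ⟨h1, by omega, h3, h4⟩
    · rw [pvBisect, if_neg hlt]
      exact ⟨le_refl _, by omega, hlo, fun i h1 h2 => hup i (by omega) h2⟩

-- ===== VERDICT (by name: the statement is the Claim_ definition above) =====
theorem convert_1d_idx_to_2d_spec : Claim_equal_convert_1d_idx_to_2d := by
  intro d1 L _ _
  unfold Spec_convert_1d_idx_to_2d convert_1d_idx_to_2d convert_1d_idx_to_2d_alt
  cases hs : PySem.Int.ofStr? d1 with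
  | none => rfl
  | some t =>
    simp only [pvLoopA_eq]
    set P := (0 : Int) :: pvBuildPref 0 L with hP
    have hPlen : P.length = L.length + 1 := by simp [hP, pvBuildPref_length]
    have hPget : ∀ k : Nat, k ≤ L.length → P.getD k 0 = pvPref L k := by
      intro k hk
      rw [hP, pvBuildPref_getD L 0 k hk, zero_add]
    have hmono : ∀ i j : Nat, i ≤ j → j < P.length → P.getD i 0 ≤ P.getD j 0 := by
      intro i j hij hj
      rw [hPget i (by omega), hPget j (by omega)]
      exact pvPref_mono L hij
    obtain ⟨_, hle, hlow, hhigh⟩ := pvBisect_spec P t hmono (L.length + 1) 0 (L.length + 1)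
      (by omega) (by omega) (by omega) (fun i h => absurd h (by omega))
      (fun i h1 h2 => absurd h2 (by omega))
    rw [hPlen]
    set r := pvBisect P t (L.length + 1) 0 (L.length + 1) with hr
    set w := pvWalk (t - 0) L with hw
    have hw' : w = pvWalk t L := by rw [hw]; norm_num
    have hwle : w ≤ L.length := by rw [hw']; exact pvWalk_le t L
    have hP0 : P.getD 0 0 = 0 := by rw [hPget 0 (by omega)]; exact pvPref_zero L
    by_cases hr0 : 0 < r
    · -- r ≥ 1: the walk length equals r - 1
      have hwr : w = r - 1 := by
        by_contra hne
        rcases Nat.lt_or_ge w (r - 1) with hlt | hge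
        · -- w < r-1: pvPref (w+1) > t contradicts hlow
          have hwn : w < L.length := by omega
          have h1 : t < pvPref L (w + 1) := hw' ▸ pvWalk_pref_gt t L (hw' ▸ hwn)
          have h2 : P.getD (w + 1) 0 ≤ t := hlow (w + 1) (by omega)
          rw [hPget (w + 1) (by omega)] at h2
          omega
        · -- r-1 < w, i.e. r ≤ w: pvPref w ≤ t contradicts hhigh
          have hrw : r ≤ w := by omega
          have h1 : t < P.getD w 0 := hhigh w hrw (by omega)
          rw [hPget w (by omega)] at h1
          rcases pvWalk_pref_le t L with h2 | h2
          · rw [← hw'] at h2; omega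
          · rw [← hw'] at h2; omega
      simp only [if_pos hr0]
      rw [hwr, hPget (r - 1) (by omega)]
      norm_num
    · -- r = 0: t < P[0] = 0, walk is 0
      have hr0' : r = 0 := by omega
      have htneg : t < 0 := by
        have := hhigh 0 (by omega) (by omega)
        rw [hP0] at this; exact this
      have hw0 : w = 0 := by rw [hw']; exact pvWalk_neg t L htneg
      simp only [if_neg hr0]
      rw [hw0, hP0, pvPref_zero]
      norm_num
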